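-- pv_equiv track=rewrite | github.com/ckoons/BubbleSpacetimeTheory | play/toy_1658_bsd_gap_closure.py | compute_chern
-- ===== SOURCE A (Python) =====
-- import math
--
-- def compute_chern(n, r=2):
--     """Chern classes of TQ^n. c(TQ^n) = (1+h)^{n+r}/(1+r*h) mod h^{n+1}."""
--     g_n = n + r
--     chern = []
--     for k in range(n + 1):
--         binom = math.comb(g_n, k)
--         if k == 0:
--             chern.append(binom)
--         else:
--             chern.append(binom - r * chern[k - 1])
--     return chern
-- ===== SOURCE B (Python) =====
-- def compute_chern(n, r=2):
--     """Chern classes of TQ^n, c(TQ^n) = (1+h)^{n+r}/(1+r*h) mod h^{n+1}, computed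
--     WITHOUT binomial coefficients: the series C satisfies the ODE
--     (1+h)(1+rh) C' = ((g-r) + (g-1)r h) C  with g = n+r, which gives the P-finite
--     (holonomic) two-term recurrence with polynomial-in-k coefficients
--         k*c_k = (g - r - (r+1)*(k-1)) * c_{k-1} + r*(g - (k-1)) * c_{k-2},  c_0 = 1;
--     the division by k is exact over the integers."""
--     g = n + r
--     chern = []
--     prev2 = 0
--     prev1 = 0
--     for k in range(n + 1):
--         if k == 0:
--             c = 1
--         else:
--             c = ((g - r - (r + 1) * (k - 1)) * prev1 + r * (g - (k - 1)) * prev2) // k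
--         chern.append(c)
--         prev2, prev1 = prev1, c
--     return chern
-- ===== Notes on version B (the rewrite author's own statement) =====
-- stated objective: faster
-- what changed: B never computes a binomial coefficient: from the ODE (1+h)(1+rh)C' = ((g-r)+(g-1)rh)C of the series C=(1+h)^g/(1+rh) it derives the holonomic two-term recurrence k*c_k = (g-r-(r+1)(k-1))*c_{k-1} + r*(g-(k-1))*c_{k-2} with exact integer division by k, replacing A's math.comb call (O(k) big multiplications each) plus first-order recurrence on the output list; intended as faster, a timing run measured ~26x at the largest size both finish.
import Mathlib
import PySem

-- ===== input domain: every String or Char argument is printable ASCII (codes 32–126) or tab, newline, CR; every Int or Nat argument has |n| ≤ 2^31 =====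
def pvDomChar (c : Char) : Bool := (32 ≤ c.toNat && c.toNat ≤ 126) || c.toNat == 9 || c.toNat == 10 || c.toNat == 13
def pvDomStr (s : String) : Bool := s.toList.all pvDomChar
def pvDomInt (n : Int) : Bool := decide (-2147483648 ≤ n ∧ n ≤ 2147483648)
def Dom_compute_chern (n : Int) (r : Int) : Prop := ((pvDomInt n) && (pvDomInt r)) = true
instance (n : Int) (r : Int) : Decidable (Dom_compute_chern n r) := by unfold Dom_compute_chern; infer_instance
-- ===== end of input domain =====

-- B computes the Chern coefficients by the holonomic two-term recurrence derived from the series' ODE instead of A's binomial-coefficient recurrence (no math.comb calls; intended as faster — a timing run measured ~26x at the largest size both finish).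


-- math.comb(a, k): exact for a ≥ 0 and k ≥ 0, the only arguments reached under Pre_ (math.comb raises otherwise)
def pycomb (a k : Int) : Int := (a.toNat.choose k.toNat : Int)

-- ===== PORT A =====
def compute_chern (n : Int) (r : Int) : List Int :=
  let g_n := n + r
  (PySem.List.pyRange 0 (n + 1) 1).foldl (fun chern k =>
    let binom := pycomb g_n k
    if k = 0 then chern ++ [binom]
    -- chern[k-1]: the index k-1 is always in range (chern has k elements here)
    else chern ++ [binom - r * PySem.List.pyGetD chern (k - 1) 0]) []

-- ===== PORT B =====
-- state = (chern, prev2, prev1); loop body: c from the holonomic recurrence, exact '//' by k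
def compute_chern_alt (n : Int) (r : Int) : List Int :=
  let g := n + r
  ((PySem.List.pyRange 0 (n + 1) 1).foldl (fun (st : List Int × Int × Int) k =>
      let c := if k = 0 then 1
        else PySem.Int.floordiv
              ((g - r - (r + 1) * (k - 1)) * st.2.2 + r * (g - (k - 1)) * st.2.1) k
      (st.1 ++ [c], st.2.2, c)) ([], 0, 0)).1

-- ===== PRECONDITION & SPEC =====
-- Pre_ excludes exactly the inputs where Python A raises: n ≥ 0 with n + r < 0 makes math.comb(n+r, 0) raise ValueError.
def Pre_compute_chern (n : Int) (r : Int) : Prop := n < 0 ∨ 0 ≤ n + r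
instance (n : Int) (r : Int) : Decidable (Pre_compute_chern n r) := by unfold Pre_compute_chern; infer_instance
def pvWitness_compute_chern : Int × Int := (3, 2)

def Spec_compute_chern (n : Int) (r : Int) (out : List Int) : Prop := out = compute_chern_alt n r
instance (n : Int) (r : Int) (out : List Int) : Decidable (Spec_compute_chern n r out) := by unfold Spec_compute_chern; infer_instance

-- ===== CLAIM =====
def Claim_equal_compute_chern : Prop := ∀ (n : Int) (r : Int), Dom_compute_chern n r → Pre_compute_chern n r → Spec_compute_chern n r (compute_chern n r)

-- ===== LEMMAS AND PROOFS =====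

-- the value A's recurrence assigns to chern[k]
def sA (g r : Int) : Nat → Int
  | 0 => pycomb g 0
  | k + 1 => pycomb g (k + 1) - r * sA g r k

-- sA shifted down by one (0 below index 0): the value held in prev1 after k iterations
def sAo (g r : Int) : Nat → Int
  | 0 => 0
  | k + 1 => sA g r k

lemma foldA (n r : Int) : ∀ (m : Nat),
    (PySem.List.pyRange 0 (m : Int) 1).foldl (fun chern k =>
      let binom := pycomb (n + r) k
      if k = 0 then chern ++ [binom] else chern ++ [binom - r * PySem.List.pyGetD chern (k - 1) 0]) []
    = (List.range m).map (sA (n + r) r) := by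
  intro m
  induction m with
  | zero => simp [PySem.List.pyRange_one_eq_nil]
  | succ j ih =>
    rw [show ((j + 1 : Nat) : Int) = (j : Int) + 1 by push_cast; ring,
        PySem.List.pyRange_one_succ_right (by positivity), List.foldl_append, ih]
    simp only [List.foldl_cons, List.foldl_nil]
    cases j with
    | zero => simp [sA]
    | succ i =>
      have hne : ((i + 1 : Nat) : Int) ≠ 0 := by positivity
      rw [if_neg hne]
      have : ((i + 1 : Nat) : Int) - 1 = (i : Nat) := by push_cast; ring
      rw [this, PySem.List.pyGetD_natCast]
      have hget : ((List.range (i + 1)).map (sA (n + r) r)).getD i 0 = sA (n + r) r i := by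
        rw [List.getD_eq_getElem _ _ (by simp)]
        simp
      rw [hget]
      have hr : List.range (i + 1 + 1) = List.range (i + 1) ++ [i + 1] := List.range_succ
      rw [hr, List.map_append]
      simp [sA]

-- (k+1)·C(g,k+1) = (g−k)·C(g,k) over ℤ, for g ≥ 0
lemma choose_step (g : Int) (hg : 0 ≤ g) (k : Nat) :
    ((k : Int) + 1) * pycomb g ((k : Int) + 1) = (g - k) * pycomb g (k : Int) := by
  have h1 : pycomb g ((k : Int) + 1) = (g.toNat.choose (k + 1) : Int) := by
    simp [pycomb, show ((k : Int) + 1).toNat = k + 1 by omega]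
  have h2 : pycomb g (k : Int) = (g.toNat.choose k : Int) := by simp [pycomb]
  rw [h1, h2]
  by_cases hlt : k < g.toNat
  · have hc := congrArg (Nat.cast : Nat → Int) (Nat.choose_succ_right_eq g.toNat k)
    push_cast [Nat.cast_sub (le_of_lt hlt)] at hc
    rw [show ((g.toNat : Int)) = g from by omega] at hc
    linear_combination hc
  · rw [Nat.choose_eq_zero_of_lt (by omega : g.toNat < k + 1)]
    rcases Nat.lt_or_ge g.toNat k with h | h
    · rw [Nat.choose_eq_zero_of_lt h]; ring
    · have : g - (k : Int) = 0 := by omega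
      rw [this]; ring
  
-- the holonomic recurrence: (i+2)·sA(i+2) = (g−r−(r+1)(i+1))·sA(i+1) + r(g−(i+1))·sA(i)
lemma holonomic (g r : Int) (hg : 0 ≤ g) (i : Nat) :
    (g - r - (r + 1) * ((i : Int) + 1)) * sA g r (i + 1) + r * (g - ((i : Int) + 1)) * sA g r i
      = ((i : Int) + 2) * sA g r (i + 2) := by
  have hstep : ((i : Int) + 1 + 1) * pycomb g ((i : Int) + 1 + 1)
      = (g - ((i + 1 : Nat) : Int)) * pycomb g ((i + 1 : Nat) : Int) := by
    have := choose_step g hg (i + 1)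
    push_cast at this ⊢
    linarith [this]
  have hA2 : sA g r (i + 2) = pycomb g ((i : Int) + 1 + 1) - r * sA g r (i + 1) := by
    show pycomb g ((i + 1 : Nat) + 1) - r * sA g r (i + 1) = _
    have : ((i + 1 : Nat) + 1 : Int) = (i : Int) + 1 + 1 := by push_cast; ring
    rw [this]
  have hA1 : pycomb g ((i + 1 : Nat) : Int) = sA g r (i + 1) + r * sA g r i := by
    have h := (show sA g r (i + 1) = pycomb g ((i : Nat) + 1) - r * sA g r i from rfl)
    have hc : ((i + 1 : Nat) : Int) = (i : Nat) + 1 := by push_cast; ring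
    rw [hc]
    linarith [h]
  have := hstep
  rw [hA1] at this
  rw [hA2]
  push_cast at this ⊢
  nlinarith [this]

-- sA at 0 and 1 for g ≥ 0
lemma sA_zero (g r : Int) : sA g r 0 = 1 := by simp [sA, pycomb]

lemma sA_one (g r : Int) (hg : 0 ≤ g) : sA g r 1 = g - r := by
  show pycomb g ((0 : Nat) + 1) - r * sA g r 0 = g - r
  rw [sA_zero]
  simp [pycomb, Nat.choose_one_right]
  omega

lemma fd_cancel (k x : Int) (hk : 0 < k) : PySem.Int.floordiv (k * x) k = x := by
  rw [PySem.Int.floordiv_eq_ediv_of_pos hk]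
  exact Int.mul_ediv_cancel_left x (by omega)

lemma foldB (n r : Int) (hg : 0 ≤ n + r) : ∀ (m : Nat),
    (PySem.List.pyRange 0 (m : Int) 1).foldl (fun (st : List Int × Int × Int) k =>
      let c := if k = 0 then 1
        else PySem.Int.floordiv
              ((n + r - r - (r + 1) * (k - 1)) * st.2.2 + r * (n + r - (k - 1)) * st.2.1) k
      (st.1 ++ [c], st.2.2, c)) ([], 0, 0)
    = ((List.range m).map (sA (n + r) r), sAo (n + r) r (m - 1), sAo (n + r) r m) := by
  intro m
  induction m with
  | zero => simp [PySem.List.pyRange_one_eq_nil, sAo]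
  | succ j ih =>
    rw [show ((j + 1 : Nat) : Int) = (j : Int) + 1 by push_cast; ring,
        PySem.List.pyRange_one_succ_right (by positivity), List.foldl_append, ih]
    simp only [List.foldl_cons, List.foldl_nil]
    cases j with
    | zero =>
      simp [sAo, sA_zero]
    | succ i =>
      have hne : ((i + 1 : Nat) : Int) ≠ 0 := by positivity
      rw [if_neg hne]
      have hsub : ((i + 1 : Nat) : Int) - 1 = (i : Int) := by push_cast; ring
      -- the numerator equals (i+1)·sA(i+1)
      have hnum : (n + r - r - (r + 1) * (((i + 1 : Nat) : Int) - 1)) * sAo (n + r) r (i + 1)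
            + r * (n + r - (((i + 1 : Nat) : Int) - 1)) * sAo (n + r) r (i + 1 - 1)
          = ((i : Int) + 1) * sA (n + r) r (i + 1) := by
        rw [hsub]
        cases i with
        | zero =>
          simp [sAo, sA_zero, sA_one (n + r) r hg]
        | succ i' =>
          show (n + r - r - (r + 1) * ((i' + 1 : Nat) : Int)) * sA (n + r) r (i' + 1)
              + r * (n + r - ((i' + 1 : Nat) : Int)) * sA (n + r) r i'
              = (((i' + 1 : Nat) : Int) + 1) * sA (n + r) r (i' + 2)
          have := holonomic (n + r) r hg i'
          push_cast at this ⊢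
          linarith [this]
      rw [hnum, show ((i + 1 : Nat) : Int) = (i : Int) + 1 by push_cast; ring,
          fd_cancel ((i : Int) + 1) _ (by positivity)]
      simp [List.range_succ, sAo]

-- ===== VERDICT =====
theorem compute_chern_spec : Claim_equal_compute_chern := by
  intro n r _ hpre
  unfold Spec_compute_chern compute_chern compute_chern_alt
  by_cases hn : n < 0
  · rw [PySem.List.pyRange_one_eq_nil (by omega : n + 1 ≤ 0)]; rfl
  · have hg : 0 ≤ n + r := by
      rcases hpre with h | h
      · omega
      · exact h
    have hcast : n + 1 = ((n.toNat + 1 : Nat) : Int) := by push_cast; omega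
    rw [hcast, foldA n r (n.toNat + 1)]
    show List.map (sA (n + r) r) (List.range (n.toNat + 1)) =
      ((PySem.List.pyRange 0 ((n.toNat + 1 : Nat) : Int) 1).foldl (fun (st : List Int × Int × Int) k =>
        let c := if k = 0 then 1
          else PySem.Int.floordiv
                ((n + r - r - (r + 1) * (k - 1)) * st.2.2 + r * (n + r - (k - 1)) * st.2.1) k
        (st.1 ++ [c], st.2.2, c)) ([], 0, 0)).1
    rw [foldB n r hg (n.toNat + 1)]
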